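-- pv_equiv track=rewrite | github.com/skhfh/letters_packages_api | task1/task1.py | simple_solution
-- ===== SOURCE A (Python) =====
-- def simple_solution(nums):
--     result = []
--     n = len(nums)
--     if n > 2:
--         for i in range(n - 2):
--             for j in range(i + 1, n - 1):
--                 for k in range(j + 1, n):
--                     if nums[i] * nums[j] * nums[k] == 0:
--                         result.append([nums[i], nums[j], nums[k]])
--     return result
-- ===== SOURCE B (Python) =====
-- def simple_solution(nums):
--     n = len(nums)
--     # zsuf[t] = number of zeros in nums[t:], built back-to-front
--     zsuf = [0]
--     for x in reversed(nums):
--         zsuf = [zsuf[0] + (x == 0)] + zsuf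
--     res = []
--     for i in range(n - 2):
--         a = nums[i]
--         for j in range(i + 1, n - 1):
--             b = nums[j]
--             if a * b == 0:
--                 # product is zero for every k > j
--                 res.extend([a, b, c] for c in nums[j + 1:])
--             else:
--                 # product is zero exactly when nums[k] == 0
--                 res.extend([a, b, 0] for _ in range(zsuf[j + 1]))
--     return res
-- ===== Notes on version B (the rewrite author's own statement) =====
-- stated objective: faster
-- what changed: B drops A's innermost k-loop: with a precomputed suffix-zero-count table it appends the whole tail when nums[i]*nums[j]==0 and otherwise one [a,b,0] row per zero in the tail, so the work is O(n^2) plus the size of the output instead of O(n^3).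
import Mathlib
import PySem

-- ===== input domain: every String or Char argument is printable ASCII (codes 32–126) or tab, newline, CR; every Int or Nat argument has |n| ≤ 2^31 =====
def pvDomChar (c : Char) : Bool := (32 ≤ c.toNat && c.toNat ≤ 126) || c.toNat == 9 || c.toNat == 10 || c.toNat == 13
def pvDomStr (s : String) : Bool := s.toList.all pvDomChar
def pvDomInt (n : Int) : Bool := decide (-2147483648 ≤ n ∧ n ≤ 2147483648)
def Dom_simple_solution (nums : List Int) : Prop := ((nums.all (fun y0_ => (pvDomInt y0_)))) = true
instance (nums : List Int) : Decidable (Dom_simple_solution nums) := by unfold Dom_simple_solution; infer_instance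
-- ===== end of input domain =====

-- B removes A's innermost loop: when nums[i]*nums[j] == 0 every later k qualifies, otherwise only
-- zero entries do, counted via a precomputed suffix-zero table; objective: faster (O(n^2+out) vs O(n^3)).


-- ===== PORT A =====
def simple_solution (nums : List Int) : List (List Int) :=
  let n : Int := nums.length
  if n > 2 then
    (PySem.List.pyRange 0 (n - 2) 1).foldl (fun res i =>
      (PySem.List.pyRange (i + 1) (n - 1) 1).foldl (fun res j =>
        (PySem.List.pyRange (j + 1) n 1).foldl (fun res k =>
          if PySem.List.pyGetD nums i 0 * PySem.List.pyGetD nums j 0 * PySem.List.pyGetD nums k 0 = 0 then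
            res ++ [[PySem.List.pyGetD nums i 0, PySem.List.pyGetD nums j 0, PySem.List.pyGetD nums k 0]]
          else res) res) res) []
  else []

-- ===== PORT B =====
def simple_solution_alt (nums : List Int) : List (List Int) :=
  let n : Int := nums.length
  -- zsuf[t] = number of zeros in nums[t:], built back-to-front by prepending
  let zsuf : List Int := nums.reverse.foldl
    (fun z x => (PySem.List.pyGetD z 0 0 + (if x = 0 then 1 else 0)) :: z) [0]
  (PySem.List.pyRange 0 (n - 2) 1).foldl (fun res i =>
    let a := PySem.List.pyGetD nums i 0
    (PySem.List.pyRange (i + 1) (n - 1) 1).foldl (fun res j =>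
      let b := PySem.List.pyGetD nums j 0
      if a * b = 0 then
        res ++ (PySem.List.slice nums (some (j + 1)) none).map (fun c => [a, b, c])
      else
        res ++ (PySem.List.pyRange 0 (PySem.List.pyGetD zsuf (j + 1) 0) 1).map (fun _ => [a, b, 0])) res) []

-- ===== PRECONDITION & SPEC =====
def Spec_simple_solution (nums : List Int) (out : List (List Int)) : Prop := out = simple_solution_alt nums
instance (nums : List Int) (out : List (List Int)) : Decidable (Spec_simple_solution nums out) := by unfold Spec_simple_solution; infer_instance

-- ===== CLAIM (what is proved, stated in full; the proofs are below) =====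
def Claim_equal_simple_solution : Prop := ∀ (nums : List Int), Dom_simple_solution nums → Spec_simple_solution nums (simple_solution nums)

-- ===== LEMMAS AND PROOFS =====

-- a filter/map over the index range [t, len) is the same filter/map over nums.drop t
lemma range_filter_map {β : Type} (l : List Int) (q : Int → Bool) (g : Int → β) :
    ∀ (m t : Nat), l.length - t = m →
    ((PySem.List.pyRange (t : Int) (l.length : Int) 1).filter (fun k => q (PySem.List.pyGetD l k 0))).map
       (fun k => g (PySem.List.pyGetD l k 0))
    = ((l.drop t).filter q).map g := by
  intro m
  induction m with
  | zero =>
    intro t ht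
    have hle : l.length ≤ t := by omega
    rw [PySem.List.pyRange_one_eq_nil (by exact_mod_cast hle), List.drop_of_length_le hle]
    simp
  | succ m ih =>
    intro t ht
    have hlt : t < l.length := by omega
    rw [PySem.List.pyRange_one_cons (by exact_mod_cast hlt)]
    have hcast : (t : Int) + 1 = ((t + 1 : Nat) : Int) := by push_cast; ring
    have hget : PySem.List.pyGetD l (t : Int) 0 = l[t] := by
      simp [PySem.List.pyGetD_natCast, List.getD_eq_getElem?_getD, List.getElem?_eq_getElem hlt]
    rw [hcast, List.filter_cons, List.drop_eq_getElem_cons hlt, List.filter_cons]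
    by_cases hq : q l[t] <;> simp [hget, hq] <;> rw [hcast] <;> exact ih (t + 1) (by omega)

-- A's innermost k-loop in closed form: all of the tail when a*b == 0, else one row per zero in the tail
lemma inner_eq (nums : List Int) (a b : Int) (t : Nat) (res : List (List Int)) :
    (PySem.List.pyRange (t : Int) (nums.length : Int) 1).foldl
      (fun r k => if a * b * PySem.List.pyGetD nums k 0 = 0 then
          r ++ [[a, b, PySem.List.pyGetD nums k 0]] else r) res
    = if a * b = 0 then res ++ (nums.drop t).map (fun c => [a, b, c])
      else res ++ List.replicate ((nums.drop t).count 0) [a, b, 0] := by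
  rw [PySem.List.foldl_append_ite (p := fun k => a * b * PySem.List.pyGetD nums k 0 = 0)
        (f := fun k => [a, b, PySem.List.pyGetD nums k 0])]
  have h := range_filter_map nums (fun c => decide (a * b * c = 0)) (fun c => [a, b, c])
    (nums.length - t) t rfl
  rw [h]
  by_cases hab : a * b = 0
  · rw [if_pos hab]
    congr 1
    rw [List.filter_eq_self.2 (by intro c _; simp [hab])]
  · rw [if_neg hab]
    congr 1
    rw [List.filter_congr (fun c _ => by simp [mul_eq_zero, hab, ← Bool.beq_eq_decide_eq] :
          ∀ c ∈ nums.drop t, decide (a * b * c = 0) = (c == 0))]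
    rw [List.filter_beq, List.map_replicate]

-- zsuf characterisation: entry t of B's table is the zero count of nums.drop t
lemma zsuf_eq (l : List Int) :
    l.reverse.foldl (fun z x => (PySem.List.pyGetD z 0 0 + (if x = 0 then 1 else 0)) :: z) [(0 : Int)]
      = (List.range (l.length + 1)).map (fun t => ((l.drop t).count 0 : Int)) := by
  induction l with
  | nil => simp
  | cons x l ih =>
    rw [List.reverse_cons, List.foldl_append, ih, List.foldl_cons, List.foldl_nil]
    rw [show (x :: l).length + 1 = (l.length + 1) + 1 from rfl]
    conv_rhs => rw [List.range_succ_eq_map, List.map_cons, List.map_map]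
    congr 1
    · have hhead : PySem.List.pyGetD
          ((List.range (l.length + 1)).map (fun t => ((l.drop t).count 0 : Int))) 0 0
          = ((l.count 0 : Nat) : Int) := by
        rw [List.range_succ_eq_map, List.map_cons, PySem.List.pyGetD_zero_cons]
        simp
      rw [hhead]
      by_cases hx : x = 0 <;> simp [hx]

-- ===== VERDICT (by name: the statement is the Claim_ definition above) =====
theorem simple_solution_spec : Claim_equal_simple_solution := by
  intro nums _
  unfold Spec_simple_solution simple_solution simple_solution_alt
  dsimp only
  by_cases h3 : ((nums.length : Int) > 2)
  · rw [if_pos h3]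
    apply PySem.List.foldl_congr_mem
    intro res i hi
    apply PySem.List.foldl_congr_mem
    intro res' j hj
    have hi' := (PySem.List.mem_pyRange_one).1 hi
    have hj' := (PySem.List.mem_pyRange_one).1 hj
    obtain ⟨t, ht⟩ : ∃ t : Nat, (t : Int) = j + 1 :=
      ⟨(j + 1).toNat, Int.toNat_of_nonneg (by omega)⟩
    have htlen : t ≤ nums.length := by
      have : j + 1 < (nums.length : Int) := by omega
      omega
    rw [← ht, inner_eq]
    rw [PySem.List.slice_from_natCast, zsuf_eq]
    have hcnt : PySem.List.pyGetD
        ((List.range (nums.length + 1)).map (fun u => (((nums.drop u).count 0 : Nat) : Int))) (t : Int) 0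
        = (((nums.drop t).count 0 : Nat) : Int) := by
      rw [PySem.List.pyGetD_natCast]
      rw [List.getD_eq_getElem?_getD, List.getElem?_map]
      simp [List.getElem?_range (by omega : t < nums.length + 1)]
    rw [hcnt]
    by_cases hab : PySem.List.pyGetD nums i 0 * PySem.List.pyGetD nums j 0 = 0
    · rw [if_pos hab, if_pos hab]
    · rw [if_neg hab, if_neg hab]
      congr 1
      rw [PySem.List.pyRange_zero_nat, List.map_map]
      simp [Function.comp_def]
  · rw [if_neg h3]
    rw [PySem.List.pyRange_one_eq_nil (by omega : (nums.length : Int) - 2 ≤ 0)]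
    simp
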